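-- pv_equiv track=rewrite | github.com/EHoSeong/SW-mobility | level2/석유 시추.py | solution
-- ===== SOURCE A (Python) =====
-- from collections import deque
--
-- def solution(land):
--     vis = [[False] * len(land[0]) for _ in range(len(land))]
--     # 붙어있는 땅의 사이즈로 realLand를 재설정
--     realLand = [[0] * len(land[0]) for _ in range(len(land))]
--
--     for i in range(len(land)):
--         for j in range(len(land[0])):
--             if land[i][j] == 1 and vis[i][j] == False:
--                 dq = deque()
--                 dq.append((i, j))
--                 vis[i][j] = True
--                 # 붙어있는 부분 담을 lan 배열열
--                 lan = []
--                 lan.append((i,j))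
--                 # 붙어있는 땅의 size
--                 size= 0
--                 while len(dq) > 0:
--                     size+=1
--                     x, y = dq.popleft()
--                     directions = [(-1, 0), (1, 0), (0, -1), (0, 1)]
--
--                     for dx, dy in directions:
--                         nx = x + dx
--                         ny = y + dy
--
--                         if (
--                             0 <= nx < len(land)
--                             and 0 <= ny < len(land[0])
--                             and vis[nx][ny] == False
--                             and land[nx][ny] == 1
--                         ):
--                             vis[nx][ny] = True
--                             dq.append((nx, ny))
--                             lan.append((nx, ny))
--                 # 붙어 있는 땅의 값을 size로 바꾼다.
--                 for xx, yy in lan: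
--                     realLand[xx][yy] = size
--
--     answer = []
--     # 땅의 사이즈로 그린 realLand에서 land[0] 길이만큼 순서대로 찔렀을떄의 각 합을 구하는 공식
--     for i in range(0,len(land[0])):
--         sum = 0
--         pre = 0
--         for j in range(len(land)):
--             pre = realLand[j-1][i]
--             if realLand[j][i] !=0 and pre != realLand[j][i]:
--                 sum+= realLand[j][i]
--         answer.append(sum)
--     if len(answer) ==0:
--         return 0
--     return max(answer)
-- ===== SOURCE B (Python) =====
-- def solution(land):
--     R = len(land)
--     C = len(land[0])
--     WATER = R * C  # a label larger than any cell id; water cells keep it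
--     # give every land cell its own id, then propagate the minimum id
--     # through each connected group until the labelling is stable
--     lab = [[i * C + j if land[i][j] == 1 else WATER for j in range(C)]
--            for i in range(R)]
--     while True:
--         new = [[min([lab[i][j]] +
--                     [lab[ni][nj]
--                      for ni, nj in ((i - 1, j), (i + 1, j), (i, j - 1), (i, j + 1))
--                      if 0 <= ni < R and 0 <= nj < C and land[ni][nj] == 1])
--                 if land[i][j] == 1 else lab[i][j]
--                 for j in range(C)]
--                for i in range(R)]
--         if new == lab:
--             break
--         lab = new
--     # group sizes by label
--     counts = {}
--     for i in range(R):
--         for j in range(C):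
--             if land[i][j] == 1:
--                 counts[lab[i][j]] = counts.get(lab[i][j], 0) + 1
--     sizes = [[counts[lab[i][j]] if land[i][j] == 1 else 0 for j in range(C)]
--              for i in range(R)]
--     best = 0
--     for c in range(C):
--         col = sum(sizes[i][c]
--                   for i in range(R)
--                   if sizes[i][c] != 0 and sizes[i][c] != sizes[i - 1][c])
--         best = max(best, col)
--     return best
-- ===== Notes on version B (the rewrite author's own statement) =====
-- stated objective: alternative
-- what changed: Component sizes are computed by iterated minimum-label propagation (every land cell starts with its own id, each pass replaces a cell's label by the minimum over itself and its land neighbours until stable, then a dict counts cells per label) instead of A's per-seed BFS flood fill with a deque and visited grid; the per-column scan over the resulting size grid is kept. Pre_ excludes only inputs where A raises IndexError: empty land (land[0]) and grids with a row shorter than row 0.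
import Mathlib
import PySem

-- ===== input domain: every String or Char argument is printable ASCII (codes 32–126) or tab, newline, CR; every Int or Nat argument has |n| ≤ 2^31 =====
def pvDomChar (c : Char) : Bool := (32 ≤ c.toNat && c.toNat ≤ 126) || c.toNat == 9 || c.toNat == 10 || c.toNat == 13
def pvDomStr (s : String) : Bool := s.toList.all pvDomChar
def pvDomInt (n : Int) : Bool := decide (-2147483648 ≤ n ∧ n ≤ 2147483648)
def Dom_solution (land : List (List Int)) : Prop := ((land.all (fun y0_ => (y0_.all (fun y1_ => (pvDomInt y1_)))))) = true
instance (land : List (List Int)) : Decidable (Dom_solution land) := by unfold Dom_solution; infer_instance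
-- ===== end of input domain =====

-- B labels components by iterated minimum-id propagation (each land cell starts with its
-- own id and repeatedly takes the minimum over itself and its land neighbours until the
-- labelling is stable) and counts cells per label with a dict, instead of A's per-seed
-- BFS flood fill; the per-column scan over the size grid stays (objective: alternative).

-- ===== PORT A =====
-- shared grid primitives (2-d list read/write, Python bounds test, the 4 directions)
def pvGet {α : Type} (d : α) (m : List (List α)) (x y : Int) : α :=
  (m.getD x.toNat []).getD y.toNat d

def pvSet {α : Type} (m : List (List α)) (x y : Int) (v : α) : List (List α) :=
  m.set x.toNat ((m.getD x.toNat []).set y.toNat v)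

def pvInb (R C nx ny : Int) : Bool :=
  decide (0 ≤ nx) && decide (nx < R) && decide (0 ≤ ny) && decide (ny < C)

def pvDirs : List (Int × Int) := [(-1, 0), (1, 0), (0, -1), (0, 1)]

-- one neighbour test/push of A's BFS (state: vis, dq, lan)
def pvPushABody (land : List (List Int)) (R C x y : Int)
    (st : List (List Bool) × List (Int × Int) × List (Int × Int)) (d : Int × Int) :
    List (List Bool) × List (Int × Int) × List (Int × Int) :=
  let nx := x + d.1
  let ny := y + d.2
  if pvInb R C nx ny && !pvGet false st.1 nx ny && (pvGet 0 land nx ny == 1) then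
    (pvSet st.1 nx ny true, st.2.1 ++ [(nx, ny)], st.2.2 ++ [(nx, ny)])
  else st

-- A's inner `for dx, dy in directions`
def pvPushA (land : List (List Int)) (R C x y : Int)
    (st : List (List Bool) × List (Int × Int) × List (Int × Int)) :
    List (List Bool) × List (Int × Int) × List (Int × Int) :=
  pvDirs.foldl (pvPushABody land R C x y) st

-- A's `while len(dq) > 0` loop (fuel-bounded; R*C+1 pops always suffice, proved below)
def pvBfsA (land : List (List Int)) (R C : Int) :
    Nat → List (Int × Int) → List (List Bool) → List (Int × Int) → Int →
    List (List Bool) × List (Int × Int) × Int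
  | 0, _, vis, lan, size => (vis, lan, size)
  | _ + 1, [], vis, lan, size => (vis, lan, size)
  | fuel + 1, (x, y) :: rest, vis, lan, size =>
    let st := pvPushA land R C x y (vis, rest, lan)
    pvBfsA land R C fuel st.2.1 st.1 st.2.2 (size + 1)

-- body of A's double loop over the grid cells
def pvBodyA (land : List (List Int)) (R C : Int)
    (st : List (List Bool) × List (List Int)) (i j : Int) :
    List (List Bool) × List (List Int) :=
  if (pvGet 0 land i j == 1) && !pvGet false st.1 i j then
    let res := pvBfsA land R C (R.toNat * C.toNat + 1) [(i, j)] (pvSet st.1 i j true) [(i, j)] 0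
    (res.1, res.2.1.foldl (fun m c => pvSet m c.1 c.2 res.2.2) st.2)
  else st

def solution (land : List (List Int)) : Int :=
  let R : Int := land.length
  let C : Int := (land.headD []).length  -- len(land[0]); Pre_solution excludes land = [] (IndexError)
  let st0 : List (List Bool) × List (List Int) :=
    (List.replicate R.toNat (List.replicate C.toNat false),
     List.replicate R.toNat (List.replicate C.toNat 0))
  let st := (PySem.List.pyRange 0 R 1).foldl (fun st i =>
    (PySem.List.pyRange 0 C 1).foldl (fun st j => pvBodyA land R C st i j) st) st0
  let realLand := st.2
  let answer := (PySem.List.pyRange 0 C 1).foldl (fun ans i =>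
    let s := (PySem.List.pyRange 0 R 1).foldl (fun s j =>
      let pre := ((PySem.List.pyGet? realLand (j - 1)).getD []).getD i.toNat 0
      let v := pvGet 0 realLand j i
      if v != 0 && pre != v then s + v else s) (0 : Int)
    ans ++ [s]) ([] : List Int)
  if answer.length = 0 then 0 else (PySem.List.max? answer (fun x => x)).getD 0

-- ===== PORT B =====
-- the four neighbour cells of (i, j), in Source B's order
def pvNbrs (i j : Int) : List (Int × Int) :=
  [(i - 1, j), (i + 1, j), (i, j - 1), (i, j + 1)]

-- Source B's initial labelling: every land cell its own id i*C+j, water cells R*C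
def pvLab0 (land : List (List Int)) (R C : Int) : List (List Int) :=
  (PySem.List.pyRange 0 R 1).map (fun i =>
    (PySem.List.pyRange 0 C 1).map (fun j =>
      if pvGet 0 land i j == 1 then i * C + j else R * C))

-- one synchronous pass: each land cell takes the minimum over itself and its land neighbours
def pvRelax (land : List (List Int)) (R C : Int) (lab : List (List Int)) : List (List Int) :=
  (PySem.List.pyRange 0 R 1).map (fun i =>
    (PySem.List.pyRange 0 C 1).map (fun j =>
      if pvGet 0 land i j == 1 then
        (((pvNbrs i j).filter (fun c => pvInb R C c.1 c.2 && (pvGet 0 land c.1 c.2 == 1))).map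
          (fun c => pvGet 0 lab c.1 c.2)).foldl min (pvGet 0 lab i j)
      else pvGet 0 lab i j))

-- Source B's `while True: … if new == lab: break` loop (fuel-bounded; R*C+1 passes always
-- reach the fixpoint, proved below)
def pvProp (land : List (List Int)) (R C : Int) : Nat → List (List Int) → List (List Int)
  | 0, lab => lab
  | fuel + 1, lab =>
    let new := pvRelax land R C lab
    if new == lab then lab else pvProp land R C fuel new

-- Source B's counting loop: counts[lab[i][j]] = counts.get(lab[i][j], 0) + 1 over land cells
def pvCounts (land lab : List (List Int)) (R C : Int) : PySem.Dict Int Int :=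
  (PySem.List.pyRange 0 R 1).foldl (fun d i =>
    (PySem.List.pyRange 0 C 1).foldl (fun d j =>
      if pvGet 0 land i j == 1 then
        d.insert (pvGet 0 lab i j) (d.getD (pvGet 0 lab i j) 0 + 1)
      else d) d) PySem.Dict.empty

def solution_alt (land : List (List Int)) : Int :=
  let R : Int := land.length
  let C : Int := (land.headD []).length  -- len(land[0]); Pre_solution excludes land = [] (IndexError)
  let lab := pvProp land R C (R.toNat * C.toNat + 1) (pvLab0 land R C)
  let counts := pvCounts land lab R C
  let sizes := (PySem.List.pyRange 0 R 1).map (fun i =>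
    (PySem.List.pyRange 0 C 1).map (fun j =>
      if pvGet 0 land i j == 1 then counts.getD (pvGet 0 lab i j) 0 else 0))
  (PySem.List.pyRange 0 C 1).foldl (fun best c =>
    let col := (PySem.List.pyRange 0 R 1).foldl (fun s i =>
      if pvGet 0 sizes i c != 0 &&
          pvGet 0 sizes i c != ((PySem.List.pyGet? sizes (i - 1)).getD []).getD c.toNat 0 then
        s + pvGet 0 sizes i c
      else s) (0 : Int)
    max best col) 0

-- ===== PRECONDITION & SPEC =====
-- Pre_ excludes exactly the inputs where the Python A raises IndexError: the empty grid
-- (land[0]) and grids with a row shorter than row 0 (A indexes land[i][j] for every j < len(land[0])).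
def Pre_solution (land : List (List Int)) : Prop :=
  land ≠ [] ∧ ∀ row ∈ land, (land.headD []).length ≤ row.length
instance (land : List (List Int)) : Decidable (Pre_solution land) := by
  unfold Pre_solution; infer_instance

def pvWitness_solution : List (List Int) := [[1, 0, 1], [1, 1, 0]]

def Spec_solution (land : List (List Int)) (out : Int) : Prop := out = solution_alt land
instance (land : List (List Int)) (out : Int) : Decidable (Spec_solution land out) := by
  unfold Spec_solution; infer_instance

-- ===== CLAIM (what is proved, stated in full; the proofs are below) =====
def Claim_equal_solution : Prop := ∀ (land : List (List Int)), Dom_solution land → Pre_solution land → Spec_solution land (solution land)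

-- ===== LEMMAS AND PROOFS =====

-- ---- spec-side vocabulary ----
def InGrid (Rn Cn : Nat) (c : Int × Int) : Prop :=
  0 ≤ c.1 ∧ c.1 < (Rn : Int) ∧ 0 ≤ c.2 ∧ c.2 < (Cn : Int)

def OkCell (land : List (List Int)) (Cn : Nat) (c : Int × Int) : Prop :=
  InGrid land.length Cn c ∧ pvGet 0 land c.1 c.2 = 1

def StepCell (land : List (List Int)) (Cn : Nat) (c c' : Int × Int) : Prop :=
  OkCell land Cn c ∧ OkCell land Cn c' ∧ (c'.1 - c.1, c'.2 - c.2) ∈ pvDirs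

def ReachCell (land : List (List Int)) (Cn : Nat) (s c : Int × Int) : Prop :=
  Relation.ReflTransGen (StepCell land Cn) s c

def Vmem (vis : List (List Bool)) (c : Int × Int) : Prop :=
  pvGet false vis c.1 c.2 = true

def Shape2 {α : Type} (Rn Cn : Nat) (m : List (List α)) : Prop :=
  m.length = Rn ∧ ∀ r ∈ m, r.length = Cn

def ClosedVis (land : List (List Int)) (Cn : Nat) (vis : List (List Bool)) : Prop :=
  ∀ c, InGrid land.length Cn c → Vmem vis c →
    OkCell land Cn c ∧ ∀ c', StepCell land Cn c c' → Vmem vis c'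

def pvAllCells (Rn Cn : Nat) : List (Int × Int) :=
  (List.range Rn).flatMap (fun i : Nat => (List.range Cn).map (fun j : Nat => ((i : Int), (j : Int))))

def pvUnvis (Rn Cn : Nat) (vis : List (List Bool)) : Nat :=
  ((pvAllCells Rn Cn).filter (fun c => !pvGet false vis c.1 c.2)).length

-- ---- basic grid lemmas ----
lemma mem_pvAllCells (Rn Cn : Nat) (c : Int × Int) :
    c ∈ pvAllCells Rn Cn ↔ InGrid Rn Cn c := by
  obtain ⟨a, b⟩ := c
  simp only [pvAllCells, List.mem_flatMap, List.mem_map, List.mem_range, InGrid, Prod.mk.injEq]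
  constructor
  · rintro ⟨i, hi, j, hj, rfl, rfl⟩
    refine ⟨by omega, by omega, by omega, by omega⟩
  · rintro ⟨h1, h2, h3, h4⟩
    exact ⟨a.toNat, by omega, b.toNat, by omega, by omega, by omega⟩

lemma nodup_pvAllCells (Rn Cn : Nat) : (pvAllCells Rn Cn).Nodup := by
  rw [pvAllCells, List.nodup_flatMap]
  constructor
  · intro i _
    exact List.Nodup.map (fun a b h => by exact_mod_cast (Prod.mk.injEq .. ▸ h).2) List.nodup_range
  · refine List.Pairwise.imp ?_ List.pairwise_lt_range
    intro i j hij
    simp only [Function.onFun, List.disjoint_left]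
    rintro c hc hc'
    obtain ⟨a, _, rfl⟩ := List.mem_map.mp hc
    obtain ⟨b, _, h⟩ := List.mem_map.mp hc'
    have := (Prod.mk.injEq .. ▸ h).1
    omega

lemma length_pvAllCells (Rn Cn : Nat) : (pvAllCells Rn Cn).length = Rn * Cn := by
  simp [pvAllCells, List.length_flatMap, List.map_const']

lemma pvUnvis_le (Rn Cn : Nat) (vis : List (List Bool)) : pvUnvis Rn Cn vis ≤ Rn * Cn := by
  calc pvUnvis Rn Cn vis ≤ (pvAllCells Rn Cn).length := List.length_filter_le _ _
  _ = Rn * Cn := length_pvAllCells Rn Cn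

lemma ingrid_toNat_ne {Rn Cn : Nat} {c c' : Int × Int} (hc : InGrid Rn Cn c)
    (hc' : InGrid Rn Cn c') (h : c ≠ c') :
    c.1.toNat ≠ c'.1.toNat ∨ c.2.toNat ≠ c'.2.toNat := by
  obtain ⟨a, b⟩ := c; obtain ⟨a', b'⟩ := c'
  obtain ⟨h1, h2, h3, h4⟩ := hc; obtain ⟨h1', h2', h3', h4'⟩ := hc'
  by_cases ha : a = a'
  · subst ha
    have hb : b ≠ b' := by rintro rfl; exact h rfl
    right; simp at *; omega
  · left; simp at *; omega

lemma getD_set_ne' {α : Type} (l : List α) {i j : Nat} (a : α) (d : α) (h : j ≠ i) :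
    (l.set i a).getD j d = l.getD j d := by
  rw [List.getD_eq_getElem?_getD, List.getElem?_set_ne (Ne.symm h), List.getD_eq_getElem?_getD]

lemma getD_set_self' {α : Type} (l : List α) {i : Nat} (a : α) (d : α) (h : i < l.length) :
    (l.set i a).getD i d = a := by
  rw [List.getD_eq_getElem?_getD, List.getElem?_set_self]
  exacts [rfl, h]

lemma pvSet_shape {α : Type} {Rn Cn : Nat} {m : List (List α)} {x y : Int} (v : α)
    (h : Shape2 Rn Cn m) (hg : InGrid Rn Cn (x, y)) : Shape2 Rn Cn (pvSet m x y v) := by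
  obtain ⟨hlen, hrow⟩ := h
  obtain ⟨h1, h2, h3, h4⟩ := hg
  have hx : x.toNat < m.length := by rw [hlen]; simp at h2 ⊢; omega
  refine ⟨by rw [pvSet, List.length_set]; exact hlen, ?_⟩
  intro r hr
  rcases List.mem_or_eq_of_mem_set hr with hr' | rfl
  · exact hrow r hr'
  · rw [List.length_set]
    exact hrow _ (by rw [List.getD_eq_getElem _ _ hx]; exact List.getElem_mem hx)

lemma pvGet_set_self {α : Type} {Rn Cn : Nat} {m : List (List α)} (d : α) {x y : Int} (v : α)
    (h : Shape2 Rn Cn m) (hg : InGrid Rn Cn (x, y)) :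
    pvGet d (pvSet m x y v) x y = v := by
  obtain ⟨hlen, hrow⟩ := h
  obtain ⟨h1, h2, h3, h4⟩ := hg
  simp only at h2 h4
  have hx : x.toNat < m.length := by omega
  have hy : y.toNat < (m.getD x.toNat []).length := by
    rw [List.getD_eq_getElem _ _ hx, hrow _ (List.getElem_mem hx)]; omega
  rw [pvGet, pvSet, getD_set_self' _ _ _ hx, getD_set_self' _ _ _ hy]

lemma pvGet_set_ne {α : Type} {m : List (List α)} (d : α) {x y a b : Int} (v : α)
    (h : a.toNat ≠ x.toNat ∨ b.toNat ≠ y.toNat) :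
    pvGet d (pvSet m x y v) a b = pvGet d m a b := by
  simp only [pvGet, pvSet]
  rcases h with h | h
  · rw [getD_set_ne' _ _ _ h]
  · by_cases hx : a.toNat = x.toNat
    · rw [hx]
      by_cases hxr : x.toNat < m.length
      · rw [getD_set_self' _ _ _ hxr, getD_set_ne' _ _ _ h]
      · rw [List.set_eq_of_length_le (by omega)]
    · rw [getD_set_ne' _ _ _ hx]

lemma Vmem_set_iff {Rn Cn : Nat} {vis : List (List Bool)} {p c : Int × Int}
    (hsh : Shape2 Rn Cn vis) (hp : InGrid Rn Cn p) (hc : InGrid Rn Cn c) :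
    Vmem (pvSet vis p.1 p.2 true) c ↔ c = p ∨ Vmem vis c := by
  unfold Vmem
  by_cases hcp : c = p
  · subst hcp
    rw [pvGet_set_self false true hsh hp]
    simp
  · rw [pvGet_set_ne false true (ingrid_toNat_ne hc hp hcp)]
    simp [hcp]

lemma filter_length_flip {α : Type} (p q : α → Bool) :
    ∀ (l : List α) (a : α), l.Nodup → a ∈ l → p a = true → q a = false →
    (∀ b ∈ l, b ≠ a → p b = q b) → (l.filter q).length + 1 = (l.filter p).length := by
  intro l
  induction l with
  | nil => intro a _ h; cases h
  | cons x t ih =>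
    intro a hnd hmem hpa hqa hne
    rcases List.mem_cons.mp hmem with rfl | hat
    · have hta : a ∉ t := (List.nodup_cons.mp hnd).1
      have hft : t.filter p = t.filter q := by
        apply List.filter_congr
        intro b hb
        exact hne b (List.mem_cons_of_mem _ hb) (fun hba => hta (hba ▸ hb))
      simp [hpa, hqa, hft]
    · have hxa : x ≠ a := fun h => ((List.nodup_cons.mp hnd).1 (h ▸ hat))
      have hpq : p x = q x := hne x (List.mem_cons_self ..) hxa
      have hih := ih a (List.nodup_cons.mp hnd).2 hat hpa hqa
        (fun b hb hba => hne b (List.mem_cons_of_mem _ hb) hba)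
      cases hpx : p x
      · have hqx : q x = false := by rw [← hpq, hpx]
        rw [List.filter_cons, List.filter_cons, hpx, hqx]
        simpa using hih
      · have hqx : q x = true := by rw [← hpq, hpx]
        rw [List.filter_cons, List.filter_cons, hpx, hqx]
        simpa [Nat.add_comm, Nat.add_left_comm] using hih

lemma pvUnvis_set {Rn Cn : Nat} {vis : List (List Bool)} {p : Int × Int}
    (hsh : Shape2 Rn Cn vis) (hp : InGrid Rn Cn p) (hnv : ¬ Vmem vis p) :
    pvUnvis Rn Cn (pvSet vis p.1 p.2 true) + 1 = pvUnvis Rn Cn vis := by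
  unfold pvUnvis
  refine filter_length_flip _ _ (pvAllCells Rn Cn) p (nodup_pvAllCells Rn Cn)
    ((mem_pvAllCells ..).mpr hp) ?_ ?_ ?_
  · simp only [Bool.not_eq_eq_eq_not, Bool.not_true]
    simp only [Vmem] at hnv
    simpa using hnv
  · simp only [Bool.not_eq_eq_eq_not, Bool.not_false]
    have := pvGet_set_self false true hsh hp
    simpa [Vmem] using this
  · intro b hb hba
    have hgb := (mem_pvAllCells ..).mp hb
    rw [pvGet_set_ne false true (ingrid_toNat_ne hgb hp hba)]

lemma pvInb_iff (Rn Cn : Nat) (x y : Int) :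
    pvInb (Rn : Int) (Cn : Int) x y = true ↔ InGrid Rn Cn (x, y) := by
  simp [pvInb, InGrid, Bool.and_eq_true, and_assoc]

-- ---- reachability lemmas ----
lemma stepCell_symm (land : List (List Int)) (Cn : Nat) :
    Symmetric (StepCell land Cn) := by
  intro a b h
  obtain ⟨ha, hb, hd⟩ := h
  refine ⟨hb, ha, ?_⟩
  simp only [pvDirs, List.mem_cons, List.not_mem_nil, or_false] at hd ⊢
  rcases hd with h | h | h | h <;> simp [Prod.ext_iff] at h ⊢ <;> omega

lemma reachCell_symm {land : List (List Int)} {Cn : Nat} {a b : Int × Int}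
    (h : ReachCell land Cn a b) : ReachCell land Cn b a :=
  (Relation.ReflTransGen.symmetric (stepCell_symm land Cn)) h

lemma reachCell_congr {land : List (List Int)} {Cn : Nat} {s c d : Int × Int}
    (h : ReachCell land Cn s c) : (ReachCell land Cn c d ↔ ReachCell land Cn s d) :=
  ⟨fun h2 => h.trans h2, fun h2 => (reachCell_symm h).trans h2⟩

lemma closed_reach {land : List (List Int)} {Cn : Nat} {vis : List (List Bool)} {c d : Int × Int}
    (hcl : ClosedVis land Cn vis) (hc : Vmem vis c) (_hg : InGrid land.length Cn c)
    (h : ReachCell land Cn c d) : Vmem vis d := by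
  induction h with
  | refl => exact hc
  | tail _ hbc ih => exact (hcl _ hbc.1.1 ih).2 _ hbc

lemma reach_ingrid {land : List (List Int)} {Cn : Nat} {c d : Int × Int}
    (hg : InGrid land.length Cn c) (h : ReachCell land Cn c d) :
    InGrid land.length Cn d := by
  induction h with
  | refl => exact hg
  | tail _ hstep _ => exact hstep.2.1.1

lemma reach_ok {land : List (List Int)} {Cn : Nat} {c d : Int × Int}
    (hoc : OkCell land Cn c) (h : ReachCell land Cn c d) : OkCell land Cn d := by
  induction h with
  | refl => exact hoc
  | tail _ hstep _ => exact hstep.2.1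

-- ---- A-side push lemma ----
lemma pvCond_iff (land : List (List Int)) (Cn : Nat) (vis : List (List Bool)) (x y : Int) :
    (pvInb (land.length : Int) (Cn : Int) x y && !pvGet false vis x y
      && (pvGet 0 land x y == 1)) = true
    ↔ (OkCell land Cn (x, y) ∧ ¬ Vmem vis (x, y)) := by
  simp only [Bool.and_eq_true, Bool.not_eq_eq_eq_not, Bool.not_true, beq_iff_eq,
    pvInb_iff, OkCell, Vmem]
  constructor
  · rintro ⟨⟨hg, hv⟩, hl⟩
    exact ⟨⟨hg, hl⟩, by simp [hv]⟩
  · rintro ⟨⟨hg, hl⟩, hv⟩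
    exact ⟨⟨hg, by simpa using hv⟩, hl⟩

lemma pushA_spec (land : List (List Int)) (Cn : Nat) (x y : Int) :
    ∀ (ds : List (Int × Int)) (vis : List (List Bool)) (dq lan : List (Int × Int)),
    Shape2 land.length Cn vis →
    ∃ visN new,
      ds.foldl (pvPushABody land (land.length : Int) (Cn : Int) x y) (vis, dq, lan)
        = (visN, dq ++ new, lan ++ new) ∧
      Shape2 land.length Cn visN ∧ new.Nodup ∧
      (∀ c ∈ new, (c.1 - x, c.2 - y) ∈ ds ∧ OkCell land Cn c ∧ ¬ Vmem vis c) ∧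
      (∀ c, InGrid land.length Cn c → (Vmem visN c ↔ Vmem vis c ∨ c ∈ new)) ∧
      (∀ d ∈ ds, OkCell land Cn (x + d.1, y + d.2) → Vmem visN (x + d.1, y + d.2)) ∧
      pvUnvis land.length Cn visN + new.length = pvUnvis land.length Cn vis := by
  intro ds
  induction ds with
  | nil =>
    intro vis dq lan hsh
    exact ⟨vis, [], by simp, hsh, by simp, by simp, fun c hc => by simp,
      by simp, by simp⟩
  | cons d0 ds ih =>
    intro vis dq lan hsh
    have hoff : (((x + d0.1, y + d0.2) : Int × Int).1 - x, ((x + d0.1, y + d0.2) : Int × Int).2 - y) = d0 := by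
      simp
    by_cases hc : OkCell land Cn (x + d0.1, y + d0.2) ∧ ¬ Vmem vis (x + d0.1, y + d0.2)
    · have hcond := (pvCond_iff land Cn vis (x + d0.1) (y + d0.2)).mpr hc
      have hg0 : InGrid land.length Cn (x + d0.1, y + d0.2) := hc.1.1
      have hstep : (d0 :: ds).foldl (pvPushABody land (land.length : Int) (Cn : Int) x y)
            (vis, dq, lan)
          = ds.foldl (pvPushABody land (land.length : Int) (Cn : Int) x y)
            (pvSet vis (x + d0.1) (y + d0.2) true, dq ++ [(x + d0.1, y + d0.2)],
             lan ++ [(x + d0.1, y + d0.2)]) := by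
        simp only [List.foldl_cons, pvPushABody, hcond]
        rfl
      obtain ⟨visN, new, heq, hshN, hnd, hnew, hmem, hcov, hunv⟩ :=
        ih (pvSet vis (x + d0.1) (y + d0.2) true) (dq ++ [(x + d0.1, y + d0.2)])
          (lan ++ [(x + d0.1, y + d0.2)]) (pvSet_shape true hsh hg0)
      have hmem' : ∀ c, InGrid land.length Cn c →
          (Vmem (pvSet vis (x + d0.1) (y + d0.2) true) c ↔ c = (x + d0.1, y + d0.2) ∨ Vmem vis c) := by
        intro c hcg
        exact Vmem_set_iff hsh hg0 hcg
      have hv0 : Vmem (pvSet vis (x + d0.1) (y + d0.2) true) (x + d0.1, y + d0.2) :=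
        (hmem' _ hg0).mpr (Or.inl rfl)
      refine ⟨visN, (x + d0.1, y + d0.2) :: new, ?_, hshN, ?_, ?_, ?_, ?_, ?_⟩
      · rw [hstep, heq]; simp
      · refine List.nodup_cons.mpr ⟨fun hmem0 => ?_, hnd⟩
        exact (hnew _ hmem0).2.2 hv0
      · intro c hcmem
        rcases List.mem_cons.mp hcmem with rfl | hcm
        · exact ⟨by rw [hoff]; exact List.mem_cons_self .., hc.1, hc.2⟩
        · obtain ⟨hin, hok, hnv⟩ := hnew c hcm
          exact ⟨List.mem_cons_of_mem _ hin, hok,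
            fun hv => hnv ((hmem' c hok.1).mpr (Or.inr hv))⟩
      · intro c hcg
        rw [hmem c hcg, hmem' c hcg, List.mem_cons]
        tauto
      · intro d hdm hok
        rcases List.mem_cons.mp hdm with rfl | hdm'
        · exact (hmem _ hg0).mpr (Or.inl hv0)
        · exact hcov d hdm' hok
      · have hus := pvUnvis_set hsh hg0 hc.2
        simp only at hus
        simp only [List.length_cons]
        omega
    · have hcond : (pvInb (land.length : Int) (Cn : Int) (x + d0.1) (y + d0.2)
          && !pvGet false vis (x + d0.1) (y + d0.2)
          && (pvGet 0 land (x + d0.1) (y + d0.2) == 1)) = false := by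
        rw [Bool.eq_false_iff]
        intro h
        exact hc ((pvCond_iff land Cn vis (x + d0.1) (y + d0.2)).mp h)
      have hstep : (d0 :: ds).foldl (pvPushABody land (land.length : Int) (Cn : Int) x y)
            (vis, dq, lan)
          = ds.foldl (pvPushABody land (land.length : Int) (Cn : Int) x y) (vis, dq, lan) := by
        simp only [List.foldl_cons, pvPushABody, hcond]
        rfl
      obtain ⟨visN, new, heq, hshN, hnd, hnew, hmem, hcov, hunv⟩ := ih vis dq lan hsh
      refine ⟨visN, new, by rw [hstep, heq], hshN, hnd, ?_, hmem, ?_, hunv⟩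
      · intro c hcm
        obtain ⟨hin, hok, hnv⟩ := hnew c hcm
        exact ⟨List.mem_cons_of_mem _ hin, hok, hnv⟩
      · intro d hdm hok
        rcases List.mem_cons.mp hdm with rfl | hdm'
        · have hvc : Vmem vis (x + d.1, y + d.2) := by
            by_contra hnv
            exact hc ⟨hok, hnv⟩
          exact (hmem _ hok.1).mpr (Or.inl hvc)
        · exact hcov d hdm' hok

-- ---- A's search invariant ----
structure AInv (land : List (List Int)) (Cn : Nat) (vis0 : List (List Bool)) (seed : Int × Int)
    (vis : List (List Bool)) (dq lan : List (Int × Int)) (size : Int) : Prop where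
  shape : Shape2 land.length Cn vis
  mem : ∀ c, InGrid land.length Cn c → (Vmem vis c ↔ Vmem vis0 c ∨ c ∈ lan)
  reach : ∀ c ∈ lan, ReachCell land Cn seed c ∧ OkCell land Cn c
  hseed : seed ∈ lan
  disj : ∀ c ∈ lan, ¬ Vmem vis0 c
  sub : ∀ c ∈ dq, c ∈ lan
  ndq : dq.Nodup
  nlan : lan.Nodup
  proc : ∀ c ∈ lan, c ∉ dq → ∀ c', StepCell land Cn c c' → Vmem vis c'
  size_eq : size = (lan.length : Int) - (dq.length : Int)

def ASearchPost (land : List (List Int)) (Cn : Nat) (vis0 : List (List Bool)) (seed : Int × Int)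
    (r : List (List Bool) × List (Int × Int) × Int) : Prop :=
  Shape2 land.length Cn r.1 ∧
  (∀ c, InGrid land.length Cn c → (Vmem r.1 c ↔ Vmem vis0 c ∨ c ∈ r.2.1)) ∧
  r.2.1.Nodup ∧
  (∀ c, c ∈ r.2.1 ↔ ReachCell land Cn seed c) ∧
  (∀ c ∈ r.2.1, OkCell land Cn c ∧ ¬ Vmem vis0 c) ∧
  r.2.2 = (r.2.1.length : Int) ∧
  ClosedVis land Cn r.1

lemma AInv_empty_post {land : List (List Int)} {Cn : Nat} {vis0 : List (List Bool)}
    {seed : Int × Int} {vis : List (List Bool)} {lan : List (Int × Int)} {size : Int}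
    (hcl : ClosedVis land Cn vis0) (hns : ¬ Vmem vis0 seed)
    (hI : AInv land Cn vis0 seed vis [] lan size) :
    ASearchPost land Cn vis0 seed (vis, lan, size) := by
  have hlanreach : ∀ c, c ∈ lan ↔ ReachCell land Cn seed c := by
    intro c
    constructor
    · exact fun h => (hI.reach c h).1
    · intro hr
      induction hr with
      | refl => exact hI.hseed
      | @tail b c' hsb hbc ih =>
        have hb : b ∈ lan := ih
        have hvc : Vmem vis c' := hI.proc b hb (by simp) _ hbc
        have hgc' : InGrid land.length Cn c' := hbc.2.1.1
        rcases (hI.mem c' hgc').mp hvc with h0 | h1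
        · exfalso
          have hreach : ReachCell land Cn seed c' := Relation.ReflTransGen.tail hsb hbc
          exact hns (closed_reach hcl h0 hgc' (reachCell_symm hreach))
        · exact h1
  refine ⟨hI.shape, hI.mem, hI.nlan, hlanreach,
    fun c hc => ⟨(hI.reach c hc).2, hI.disj c hc⟩, by simpa using hI.size_eq, ?_⟩
  intro c hg hv
  rcases (hI.mem c hg).mp hv with h0 | h1
  · obtain ⟨hok, hnb⟩ := hcl c hg h0
    exact ⟨hok, fun c' hstep => (hI.mem c' hstep.2.1.1).mpr (Or.inl (hnb c' hstep))⟩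
  · exact ⟨(hI.reach c h1).2, fun c' hstep => hI.proc c h1 (by simp) c' hstep⟩

lemma bfsA_spec (land : List (List Int)) (Cn : Nat) (vis0 : List (List Bool)) (seed : Int × Int)
    (hcl : ClosedVis land Cn vis0) (hns : ¬ Vmem vis0 seed) :
    ∀ (fuel : Nat) (dq : List (Int × Int)) (vis : List (List Bool)) (lan : List (Int × Int)) (size : Int),
    AInv land Cn vis0 seed vis dq lan size →
    pvUnvis land.length Cn vis + dq.length ≤ fuel →
    ASearchPost land Cn vis0 seed
      (pvBfsA land (land.length : Int) (Cn : Int) fuel dq vis lan size) := by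
  intro fuel
  induction fuel with
  | zero =>
    intro dq vis lan size hI hfuel
    have hdq : dq = [] := List.length_eq_zero_iff.mp (by omega)
    subst hdq
    exact AInv_empty_post hcl hns hI
  | succ fuel ih =>
    intro dq vis lan size hI hfuel
    match dq with
    | [] => exact AInv_empty_post hcl hns hI
    | (x, y) :: rest =>
      have hxy_lan : (x, y) ∈ lan := hI.sub _ (List.mem_cons_self ..)
      have hxy_rest : (x, y) ∉ rest := (List.nodup_cons.mp hI.ndq).1
      obtain ⟨visN, new, heq, hshN, hndnew, hnew, hmemN, hcov, hunv⟩ :=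
        pushA_spec land Cn x y pvDirs vis rest lan hI.shape
      have hunf : pvBfsA land (land.length : Int) (Cn : Int) (fuel + 1) ((x, y) :: rest) vis lan size
          = pvBfsA land (land.length : Int) (Cn : Int) fuel (rest ++ new) visN (lan ++ new) (size + 1) := by
        show pvBfsA land _ _ fuel (pvPushA land _ _ x y (vis, rest, lan)).2.1
          (pvPushA land _ _ x y (vis, rest, lan)).1
          (pvPushA land _ _ x y (vis, rest, lan)).2.2 (size + 1) = _
        rw [pvPushA, heq]
      rw [hunf]
      have hokxy : OkCell land Cn (x, y) := (hI.reach _ hxy_lan).2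
      have hreachxy : ReachCell land Cn seed (x, y) := (hI.reach _ hxy_lan).1
      have hmono : ∀ c, InGrid land.length Cn c → Vmem vis c → Vmem visN c :=
        fun c hg hv => (hmemN c hg).mpr (Or.inl hv)
      have hlanV : ∀ c ∈ lan, Vmem vis c :=
        fun c hc => (hI.mem c (hI.reach c hc).2.1).mpr (Or.inr hc)
      have hnewlan : ∀ c ∈ new, c ∉ lan := fun c hc hcl' => (hnew c hc).2.2 (hlanV c hcl')
      have hnewrest : ∀ c ∈ new, c ∉ rest :=
        fun c hc hcr => (hnew c hc).2.2 (hlanV c (hI.sub c (List.mem_cons_of_mem _ hcr)))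
      refine ih (rest ++ new) visN (lan ++ new) (size + 1)
        ⟨hshN, ?_, ?_, ?_, ?_, ?_, ?_, ?_, ?_, ?_⟩ ?_
      · intro c hg
        rw [hmemN c hg, hI.mem c hg, List.mem_append]
        tauto
      · intro c hc
        rcases List.mem_append.mp hc with hc' | hc'
        · exact hI.reach c hc'
        · obtain ⟨hd, hok, _⟩ := hnew c hc'
          exact ⟨hreachxy.tail ⟨hokxy, hok, hd⟩, hok⟩
      · exact List.mem_append_left _ hI.hseed
      · intro c hc
        rcases List.mem_append.mp hc with hc' | hc'
        · exact hI.disj c hc'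
        · exact fun hv0 => (hnew c hc').2.2 ((hI.mem c (hnew c hc').2.1.1).mpr (Or.inl hv0))
      · intro c hc
        rcases List.mem_append.mp hc with hc' | hc'
        · exact List.mem_append_left _ (hI.sub c (List.mem_cons_of_mem _ hc'))
        · exact List.mem_append_right _ hc'
      · refine ((List.nodup_cons.mp hI.ndq).2).append hndnew ?_
        intro c hcr hcn
        exact hnewrest c hcn hcr
      · refine hI.nlan.append hndnew ?_
        intro c hcl' hcn
        exact hnewlan c hcn hcl'
      · intro c hc hcnot c' hstep
        rcases List.mem_append.mp hc with hc' | hc'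
        · by_cases hcxy : c = (x, y)
          · subst hcxy
            obtain ⟨cx, cy⟩ := c'
            have hd : (cx - x, cy - y) ∈ pvDirs := hstep.2.2
            have hc'eq : ((cx, cy) : Int × Int) = (x + (cx - x), y + (cy - y)) := by
              simp
            rw [hc'eq]
            exact hcov _ hd (by rw [← hc'eq]; exact hstep.2.1)
          · have hcnr : c ∉ rest := fun hr => hcnot (List.mem_append_left _ hr)
            have hv := hI.proc c hc' (by simp [hcxy, hcnr]) c' hstep
            exact hmono c' hstep.2.1.1 hv
        · exfalso
          exact hcnot (List.mem_append_right _ hc')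
      · have hsz := hI.size_eq
        simp only [List.length_append, List.length_cons] at hsz ⊢
        push_cast at hsz ⊢
        omega
      · simp only [List.length_append]
        simp only [List.length_cons] at hfuel
        omega

-- ---- the outer loop invariant (A side) ----
structure OutInv (land : List (List Int)) (Cn : Nat) (P : List (Int × Int))
    (st : List (List Bool) × List (List Int)) : Prop where
  shapeV : Shape2 land.length Cn st.1
  shapeM : Shape2 land.length Cn st.2
  closed : ClosedVis land Cn st.1
  proc : ∀ c ∈ P, InGrid land.length Cn c → pvGet 0 land c.1 c.2 = 1 → Vmem st.1 c
  char : ∀ c, InGrid land.length Cn c →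
    (Vmem st.1 c → ∃ l : List (Int × Int), l.Nodup ∧
      (∀ d, d ∈ l ↔ ReachCell land Cn c d) ∧ pvGet 0 st.2 c.1 c.2 = (l.length : Int)) ∧
    (¬ Vmem st.1 c → pvGet 0 st.2 c.1 c.2 = 0)

lemma setAll_spec {Rn Cn : Nat} (s : Int) :
    ∀ (l : List (Int × Int)) (m : List (List Int)), Shape2 Rn Cn m → (∀ c ∈ l, InGrid Rn Cn c) →
    Shape2 Rn Cn (l.foldl (fun m c => pvSet m c.1 c.2 s) m) ∧
    ∀ c, InGrid Rn Cn c →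
      (c ∈ l → pvGet 0 (l.foldl (fun m c => pvSet m c.1 c.2 s) m) c.1 c.2 = s) ∧
      (c ∉ l → pvGet 0 (l.foldl (fun m c => pvSet m c.1 c.2 s) m) c.1 c.2 = pvGet 0 m c.1 c.2) := by
  intro l
  induction l with
  | nil =>
    intro m hsh _
    exact ⟨hsh, fun c hg => ⟨fun h => absurd h (by simp), fun _ => rfl⟩⟩
  | cons c0 l ih =>
    intro m hsh hall
    have hg0 : InGrid Rn Cn c0 := hall c0 (List.mem_cons_self ..)
    have hsh' : Shape2 Rn Cn (pvSet m c0.1 c0.2 s) := pvSet_shape s hsh hg0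
    obtain ⟨hshF, hchar⟩ := ih (pvSet m c0.1 c0.2 s) hsh'
      (fun c hc => hall c (List.mem_cons_of_mem _ hc))
    rw [List.foldl_cons]
    refine ⟨hshF, ?_⟩
    intro c hg
    constructor
    · intro hcmem
      rcases List.mem_cons.mp hcmem with rfl | hcm
      · by_cases hcl : c ∈ l
        · exact (hchar c hg).1 hcl
        · rw [(hchar c hg).2 hcl]
          exact pvGet_set_self 0 s hsh hg
      · exact (hchar c hg).1 hcm
    · intro hcnot
      have hcl : c ∉ l := fun h => hcnot (List.mem_cons_of_mem _ h)
      have hc0 : c ≠ c0 := fun h => hcnot (h ▸ List.mem_cons_self ..)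
      rw [(hchar c hg).2 hcl]
      exact pvGet_set_ne 0 s (ingrid_toNat_ne hg hg0 hc0)

lemma bodyA_inv {land : List (List Int)} {Cn : Nat} {P : List (Int × Int)}
    {st : List (List Bool) × List (List Int)} (hI : OutInv land Cn P st)
    {c : Int × Int} (hc : InGrid land.length Cn c) :
    OutInv land Cn (P ++ [c]) (pvBodyA land (land.length : Int) (Cn : Int) st c.1 c.2) := by
  by_cases hcond : pvGet 0 land c.1 c.2 = 1 ∧ ¬ Vmem st.1 c
  · have hok : OkCell land Cn c := ⟨hc, hcond.1⟩
    have hbool : ((pvGet 0 land c.1 c.2 == 1) && !pvGet false st.1 c.1 c.2) = true := by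
      simp only [Bool.and_eq_true, beq_iff_eq, Bool.not_eq_eq_eq_not, Bool.not_true]
      exact ⟨hcond.1, by simpa [Vmem] using hcond.2⟩
    have hred : pvBodyA land (land.length : Int) (Cn : Int) st c.1 c.2
        = ((pvBfsA land (land.length : Int) (Cn : Int)
              ((land.length : Int).toNat * ((Cn : Int)).toNat + 1) [(c.1, c.2)]
              (pvSet st.1 c.1 c.2 true) [(c.1, c.2)] 0).1,
           (pvBfsA land (land.length : Int) (Cn : Int)
              ((land.length : Int).toNat * ((Cn : Int)).toNat + 1) [(c.1, c.2)]
              (pvSet st.1 c.1 c.2 true) [(c.1, c.2)] 0).2.1.foldl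
             (fun m e => pvSet m e.1 e.2
               (pvBfsA land (land.length : Int) (Cn : Int)
                  ((land.length : Int).toNat * ((Cn : Int)).toNat + 1) [(c.1, c.2)]
                  (pvSet st.1 c.1 c.2 true) [(c.1, c.2)] 0).2.2) st.2) := by
      simp only [pvBodyA, hbool]
      rfl
    rw [hred]
    have hsh1 : Shape2 land.length Cn (pvSet st.1 c.1 c.2 true) := pvSet_shape true hI.shapeV hc
    have hInv : AInv land Cn st.1 c (pvSet st.1 c.1 c.2 true) [(c.1, c.2)] [(c.1, c.2)] 0 := by
      refine ⟨hsh1, ?_, ?_, by simp, ?_, fun e he => he, List.nodup_singleton _,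
        List.nodup_singleton _, ?_, by simp⟩
      · intro e hg
        have heta : ((c.1, c.2) : Int × Int) = c := rfl
        rw [Vmem_set_iff hI.shapeV hc hg]
        simp only [heta, List.mem_cons, List.not_mem_nil, or_false]
        tauto
      · intro e he
        simp only [List.mem_cons, List.not_mem_nil, or_false] at he
        subst he
        exact ⟨Relation.ReflTransGen.refl, hok⟩
      · intro e he
        simp only [List.mem_cons, List.not_mem_nil, or_false] at he
        subst he
        exact hcond.2
      · intro e he hne
        exact absurd he hne
    have hfuel : pvUnvis land.length Cn (pvSet st.1 c.1 c.2 true) + ([(c.1, c.2)] : List (Int × Int)).length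
        ≤ ((land.length : Int).toNat * ((Cn : Int)).toNat + 1) := by
      have := pvUnvis_le land.length Cn (pvSet st.1 c.1 c.2 true)
      simp only [Int.toNat_natCast, List.length_cons, List.length_nil]
      omega
    obtain ⟨hshF, hmemF, hndF, hreachF, hokF, hsizeF, hclF⟩ :=
      bfsA_spec land Cn st.1 c hI.closed hcond.2 _ _ _ _ _ hInv hfuel
    have hallg : ∀ e ∈ (pvBfsA land (land.length : Int) (Cn : Int)
        ((land.length : Int).toNat * ((Cn : Int)).toNat + 1) [(c.1, c.2)]
        (pvSet st.1 c.1 c.2 true) [(c.1, c.2)] 0).2.1, InGrid land.length Cn e :=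
      fun e he => (hokF e he).1.1
    obtain ⟨hshM, hvalchar⟩ := setAll_spec _ _ st.2 hI.shapeM hallg
    refine ⟨hshF, hshM, hclF, ?_, ?_⟩
    · intro e he hg hl1
      rcases List.mem_append.mp he with he' | he'
      · exact (hmemF e hg).mpr (Or.inl (hI.proc e he' hg hl1))
      · have : e = c := by simpa using he'
        subst this
        exact (hmemF e hg).mpr (Or.inr ((hreachF e).mpr Relation.ReflTransGen.refl))
    · intro e hg
      constructor
      · intro hvF
        rcases (hmemF e hg).mp hvF with hv0 | hlan
        · have hnotl : e ∉ _ := fun hm => (hokF e hm).2 hv0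
          obtain ⟨l, hnd, hm, hval⟩ := (hI.char e hg).1 hv0
          exact ⟨l, hnd, hm, by rw [(hvalchar e hg).2 hnotl]; exact hval⟩
        · refine ⟨_, hndF, ?_, ?_⟩
          · intro d
            exact (hreachF d).trans (reachCell_congr ((hreachF e).mp hlan)).symm
          · rw [(hvalchar e hg).1 hlan, hsizeF]
      · intro hnvF
        have hnv0 : ¬ Vmem st.1 e := fun hv => hnvF ((hmemF e hg).mpr (Or.inl hv))
        have hnotl : e ∉ _ := fun hm => hnvF ((hmemF e hg).mpr (Or.inr hm))
        rw [(hvalchar e hg).2 hnotl]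
        exact (hI.char e hg).2 hnv0
  · have hbool : ((pvGet 0 land c.1 c.2 == 1) && !pvGet false st.1 c.1 c.2) = false := by
      rw [Bool.eq_false_iff]
      intro h
      simp only [Bool.and_eq_true, beq_iff_eq, Bool.not_eq_eq_eq_not, Bool.not_true] at h
      exact hcond ⟨h.1, by simpa [Vmem] using h.2⟩
    have hred : pvBodyA land (land.length : Int) (Cn : Int) st c.1 c.2 = st := by
      simp only [pvBodyA, hbool]
      rfl
    rw [hred]
    refine ⟨hI.shapeV, hI.shapeM, hI.closed, ?_, hI.char⟩
    intro e he hg hl1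
    rcases List.mem_append.mp he with he' | he'
    · exact hI.proc e he' hg hl1
    · have : e = c := by simpa using he'
      subst this
      by_contra hnv
      exact hcond ⟨hl1, hnv⟩

-- ---- final characterization and uniqueness ----
def FinalChar (land : List (List Int)) (Cn : Nat) (M : List (List Int)) : Prop :=
  Shape2 land.length Cn M ∧ ∀ c, InGrid land.length Cn c →
    (pvGet 0 land c.1 c.2 = 1 → ∃ l : List (Int × Int), l.Nodup ∧
      (∀ d, d ∈ l ↔ ReachCell land Cn c d) ∧ pvGet 0 M c.1 c.2 = (l.length : Int)) ∧
    (pvGet 0 land c.1 c.2 ≠ 1 → pvGet 0 M c.1 c.2 = 0)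

lemma finalChar_unique {land : List (List Int)} {Cn : Nat} {M1 M2 : List (List Int)}
    (h1 : FinalChar land Cn M1) (h2 : FinalChar land Cn M2) : M1 = M2 := by
  obtain ⟨⟨hlen1, hrow1⟩, hchar1⟩ := h1
  obtain ⟨⟨hlen2, hrow2⟩, hchar2⟩ := h2
  apply List.ext_getElem (by omega)
  intro a ha1 ha2
  apply List.ext_getElem (by rw [hrow1 _ (List.getElem_mem ha1), hrow2 _ (List.getElem_mem ha2)])
  intro b hb1 hb2
  have hbc1 : b < Cn := by rw [← hrow1 _ (List.getElem_mem ha1)]; exact hb1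
  have hg : InGrid land.length Cn ((a : Int), (b : Int)) := by
    refine ⟨by omega, by simp; omega, by omega, by simp; omega⟩
  have hget1 : pvGet 0 M1 (a : Int) (b : Int) = M1[a][b] := by
    rw [pvGet]
    simp only [Int.toNat_natCast]
    rw [List.getD_eq_getElem _ _ ha1, List.getD_eq_getElem _ _ hb1]
  have hget2 : pvGet 0 M2 (a : Int) (b : Int) = M2[a][b] := by
    rw [pvGet]
    simp only [Int.toNat_natCast]
    rw [List.getD_eq_getElem _ _ ha2, List.getD_eq_getElem _ _ hb2]
  by_cases hland : pvGet 0 land (a : Int) (b : Int) = 1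
  · obtain ⟨l1, hnd1, hmem1, hval1⟩ := (hchar1 _ hg).1 hland
    obtain ⟨l2, hnd2, hmem2, hval2⟩ := (hchar2 _ hg).1 hland
    have hperm : l1.Perm l2 := (List.perm_ext_iff_of_nodup hnd1 hnd2).mpr
      (fun d => by rw [hmem1 d, hmem2 d])
    rw [← hget1, ← hget2, hval1, hval2, hperm.length_eq]
  · rw [← hget1, ← hget2, (hchar1 _ hg).2 hland, (hchar2 _ hg).2 hland]

lemma outInv_finalChar {land : List (List Int)} {Cn : Nat} {P : List (Int × Int)}
    {st : List (List Bool) × List (List Int)} (hI : OutInv land Cn P st)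
    (hall : ∀ c, InGrid land.length Cn c → c ∈ P) : FinalChar land Cn st.2 := by
  refine ⟨hI.shapeM, ?_⟩
  intro c hg
  constructor
  · intro hl1
    exact (hI.char c hg).1 (hI.proc c (hall c hg) hg hl1)
  · intro hl1
    exact (hI.char c hg).2 (fun hv => hl1 (hI.closed c hg hv).1.2)

lemma pvGet_replicate {α : Type} (d v : α) (R C : Nat) (x y : Int) :
    pvGet d (List.replicate R (List.replicate C v)) x y = if x.toNat < R ∧ y.toNat < C then v else d := by
  rw [pvGet]
  simp only [List.getD_eq_getElem?_getD, List.getElem?_replicate]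
  by_cases hx : x.toNat < R
  · simp only [hx, if_true, Option.getD_some]
    by_cases hy : y.toNat < C
    · simp [hy]
    · simp [hy]
  · simp [hx]

lemma init_outInv (land : List (List Int)) (Cn : Nat) :
    OutInv land Cn []
      (List.replicate land.length (List.replicate Cn false),
       List.replicate land.length (List.replicate Cn 0)) := by
  have hv : ∀ c : Int × Int, ¬ Vmem (List.replicate land.length (List.replicate Cn false)) c := by
    intro c hc
    rw [Vmem, pvGet_replicate] at hc
    split at hc <;> simp_all
  refine ⟨⟨by simp, ?_⟩, ⟨by simp, ?_⟩, ?_, ?_, ?_⟩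
  · intro r hr
    rw [List.eq_of_mem_replicate hr]
    simp
  · intro r hr
    rw [List.eq_of_mem_replicate hr]
    simp
  · intro c hg hvm
    exact absurd hvm (hv c)
  · intro c hc
    exact absurd hc (by simp)
  · intro c hg
    refine ⟨fun hvm => absurd hvm (hv c), fun _ => ?_⟩
    rw [pvGet_replicate]
    split <;> rfl

lemma foldl_flatA {γ : Type} (outer : List Int) (inner : List Int) (g : γ → Int → Int → γ) :
    ∀ st, (outer.flatMap (fun i => inner.map (fun j => ((i, j) : Int × Int)))).foldl
      (fun st c => g st c.1 c.2) st
    = outer.foldl (fun st i => inner.foldl (fun st j => g st i j) st) st := by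
  induction outer with
  | nil => intro st; rfl
  | cons i os ih =>
    intro st
    simp only [List.flatMap_cons, List.foldl_append, List.foldl_cons, List.foldl_map]
    rw [ih]

lemma outerA_fold (land : List (List Int)) (Cn : Nat) :
    ∀ (cells : List (Int × Int)) (st : List (List Bool) × List (List Int)) (P : List (Int × Int)),
    OutInv land Cn P st → (∀ c ∈ cells, InGrid land.length Cn c) →
    OutInv land Cn (P ++ cells)
      (cells.foldl (fun st c => pvBodyA land (land.length : Int) (Cn : Int) st c.1 c.2) st) := by
  intro cells
  induction cells with
  | nil => intro st P hI _; simpa using hI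
  | cons c cs ih =>
    intro st P hI hall
    have h1 := bodyA_inv hI (hall c (List.mem_cons_self ..))
    have h2 := ih _ (P ++ [c]) h1 (fun e he => hall e (List.mem_cons_of_mem _ he))
    rw [List.foldl_cons]
    have : (P ++ [c]) ++ cs = P ++ (c :: cs) := by simp
    rwa [this] at h2

lemma outerA_finalChar (land : List (List Int)) (Cn : Nat) :
    FinalChar land Cn
      ((PySem.List.pyRange 0 (land.length : Int) 1).foldl (fun st i =>
        (PySem.List.pyRange 0 (Cn : Int) 1).foldl
          (fun st j => pvBodyA land (land.length : Int) (Cn : Int) st i j) st)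
        (List.replicate land.length (List.replicate Cn false),
         List.replicate land.length (List.replicate Cn 0))).2 := by
  have hflat := foldl_flatA (PySem.List.pyRange 0 (land.length : Int) 1)
    (PySem.List.pyRange 0 (Cn : Int) 1)
    (fun st i j => pvBodyA land (land.length : Int) (Cn : Int) st i j)
    (List.replicate land.length (List.replicate Cn false),
     List.replicate land.length (List.replicate Cn 0))
  rw [← hflat]
  have hcells : ∀ c ∈ (PySem.List.pyRange 0 (land.length : Int) 1).flatMap
      (fun i => (PySem.List.pyRange 0 (Cn : Int) 1).map (fun j => ((i, j) : Int × Int))),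
      InGrid land.length Cn c := by
    intro c hcm
    obtain ⟨i, hi, hcm2⟩ := List.mem_flatMap.mp hcm
    obtain ⟨j, hj, rfl⟩ := List.mem_map.mp hcm2
    rw [PySem.List.mem_pyRange_one] at hi hj
    exact ⟨hi.1, hi.2, hj.1, hj.2⟩
  have hfold := outerA_fold land Cn _ _ [] (init_outInv land Cn) hcells
  refine outInv_finalChar hfold ?_
  intro c hg
  simp only [List.nil_append]
  refine List.mem_flatMap.mpr ⟨c.1, ?_, List.mem_map.mpr ⟨c.2, ?_, rfl⟩⟩
  · rw [PySem.List.mem_pyRange_one]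
    exact ⟨hg.1, hg.2.1⟩
  · rw [PySem.List.mem_pyRange_one]
    exact ⟨hg.2.2.1, hg.2.2.2⟩

-- ================= B-side lemmas: minimum-label propagation =================

def pvOkB (land : List (List Int)) (Cn : Nat) (c : Int × Int) : Bool :=
  pvInb (land.length : Int) (Cn : Int) c.1 c.2 && (pvGet 0 land c.1 c.2 == 1)

lemma pvOkB_iff (land : List (List Int)) (Cn : Nat) (c : Int × Int) :
    pvOkB land Cn c = true ↔ OkCell land Cn c := by
  obtain ⟨x, y⟩ := c
  simp only [pvOkB, Bool.and_eq_true, beq_iff_eq, pvInb_iff, OkCell]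

lemma mem_nbrs_iff (c n : Int × Int) :
    n ∈ pvNbrs c.1 c.2 ↔ (n.1 - c.1, n.2 - c.2) ∈ pvDirs := by
  obtain ⟨a, b⟩ := c; obtain ⟨x, y⟩ := n
  simp only [pvNbrs, pvDirs, List.mem_cons, List.not_mem_nil, or_false, Prod.mk.injEq]
  omega

-- d is reachable from c within at most k steps
def pvBall (land : List (List Int)) (Cn : Nat) : Nat → (Int × Int) → (Int × Int) → Bool
  | 0, c, d => c == d
  | k + 1, c, d => pvBall land Cn k c d ||
      (pvNbrs c.1 c.2).any (fun n => pvOkB land Cn c && pvOkB land Cn n && pvBall land Cn k n d)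

lemma ball_zero_iff (land : List (List Int)) (Cn : Nat) (c d : Int × Int) :
    pvBall land Cn 0 c d = true ↔ d = c := by
  simp only [pvBall, beq_iff_eq]
  exact ⟨Eq.symm, Eq.symm⟩

lemma ball_succ_iff (land : List (List Int)) (Cn k : Nat) (c d : Int × Int) :
    pvBall land Cn (k + 1) c d = true ↔
      pvBall land Cn k c d = true ∨ ∃ n, StepCell land Cn c n ∧ pvBall land Cn k n d = true := by
  simp only [pvBall, Bool.or_eq_true, List.any_eq_true, Bool.and_eq_true, pvOkB_iff]
  constructor
  · rintro (h | ⟨n, hn, ⟨⟨hoc, hon⟩, hb⟩⟩)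
    · exact Or.inl h
    · exact Or.inr ⟨n, ⟨hoc, hon, (mem_nbrs_iff c n).mp hn⟩, hb⟩
  · rintro (h | ⟨n, ⟨hoc, hon, hd⟩, hb⟩)
    · exact Or.inl h
    · exact Or.inr ⟨n, (mem_nbrs_iff c n).mpr hd, ⟨hoc, hon⟩, hb⟩

lemma ball_mono_succ {land : List (List Int)} {Cn k : Nat} {c d : Int × Int}
    (h : pvBall land Cn k c d = true) : pvBall land Cn (k + 1) c d = true :=
  (ball_succ_iff land Cn k c d).mpr (Or.inl h)

lemma ball_mono {land : List (List Int)} {Cn : Nat} {k k' : Nat} (hk : k ≤ k')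
    {c d : Int × Int} (h : pvBall land Cn k c d = true) : pvBall land Cn k' c d = true := by
  induction k' with
  | zero => have : k = 0 := by omega
            subst this; exact h
  | succ k' ih =>
    by_cases hk' : k = k' + 1
    · subst hk'; exact h
    · exact ball_mono_succ (ih (by omega))

lemma ball_refl (land : List (List Int)) (Cn : Nat) (k : Nat) (c : Int × Int) :
    pvBall land Cn k c c = true :=
  ball_mono (Nat.zero_le k) ((ball_zero_iff land Cn c c).mpr rfl)

lemma ball_to_reach {land : List (List Int)} {Cn : Nat} :
    ∀ {k : Nat} {c d : Int × Int}, pvBall land Cn k c d = true → ReachCell land Cn c d := by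
  intro k
  induction k with
  | zero =>
    intro c d h
    rw [ball_zero_iff] at h
    subst h
    exact Relation.ReflTransGen.refl
  | succ k ih =>
    intro c d h
    rcases (ball_succ_iff land Cn k c d).mp h with h | ⟨n, hstep, hb⟩
    · exact ih h
    · exact Relation.ReflTransGen.head hstep (ih hb)

lemma ball_ingrid {land : List (List Int)} {Cn : Nat} :
    ∀ {k : Nat} {c d : Int × Int}, InGrid land.length Cn c →
      pvBall land Cn k c d = true → InGrid land.length Cn d := by
  intro k
  induction k with
  | zero =>
    intro c d hg h
    rw [ball_zero_iff] at h
    subst h; exact hg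
  | succ k ih =>
    intro c d hg h
    rcases (ball_succ_iff land Cn k c d).mp h with h | ⟨n, hstep, hb⟩
    · exact ih hg h
    · exact ih hstep.2.1.1 hb

lemma ball_step {land : List (List Int)} {Cn : Nat} :
    ∀ {k : Nat} {c d e : Int × Int}, pvBall land Cn k c d = true →
      StepCell land Cn d e → pvBall land Cn (k + 1) c e = true := by
  intro k
  induction k with
  | zero =>
    intro c d e h hstep
    rw [ball_zero_iff] at h
    subst h
    exact (ball_succ_iff land Cn 0 d e).mpr
      (Or.inr ⟨e, hstep, (ball_zero_iff land Cn e e).mpr rfl⟩)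
  | succ k ih =>
    intro c d e h hstep
    rcases (ball_succ_iff land Cn k c d).mp h with h | ⟨n, hstepn, hb⟩
    · exact ball_mono_succ (ih h hstep)
    · exact (ball_succ_iff land Cn (k + 1) c e).mpr (Or.inr ⟨n, hstepn, ih hb hstep⟩)

def pvBallSet (land : List (List Int)) (Cn k : Nat) (c : Int × Int) : List (Int × Int) :=
  (pvAllCells land.length Cn).filter (fun d => pvBall land Cn k c d)

lemma ballSet_sublist (land : List (List Int)) (Cn k : Nat) (c : Int × Int) :
    (pvBallSet land Cn k c).Sublist (pvBallSet land Cn (k + 1) c) :=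
  List.monotone_filter_right _ (fun _ h => ball_mono_succ h)

lemma exists_ball_stab (land : List (List Int)) (Cn : Nat) (c : Int × Int)
    (hg : InGrid land.length Cn c) :
    ∃ j < land.length * Cn,
      (pvBallSet land Cn (j + 1) c).length = (pvBallSet land Cn j c).length := by
  by_contra hno
  have hno' : ∀ j, j < land.length * Cn →
      (pvBallSet land Cn (j + 1) c).length ≠ (pvBallSet land Cn j c).length :=
    fun j hj h => hno ⟨j, hj, h⟩
  have hgrow : ∀ k, k ≤ land.length * Cn → k + 1 ≤ (pvBallSet land Cn k c).length := by
    intro k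
    induction k with
    | zero =>
      intro _
      have hc : c ∈ pvBallSet land Cn 0 c := by
        rw [pvBallSet, List.mem_filter]
        exact ⟨(mem_pvAllCells ..).mpr hg, ball_refl land Cn 0 c⟩
      have := List.length_pos_of_mem hc
      omega
    | succ k ih =>
      intro hk
      have hle := (ballSet_sublist land Cn k c).length_le
      have hne := hno' k (by omega)
      have := ih (by omega)
      omega
  have h1 := hgrow (land.length * Cn) le_rfl
  have h2 : (pvBallSet land Cn (land.length * Cn) c).length ≤ land.length * Cn := by
    calc (pvBallSet land Cn (land.length * Cn) c).length
        ≤ (pvAllCells land.length Cn).length := List.length_filter_le _ _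
      _ = land.length * Cn := length_pvAllCells ..
  omega

lemma ball_reach_iff (land : List (List Int)) (Cn : Nat) (c : Int × Int)
    (hg : InGrid land.length Cn c) (K : Nat) (hK : land.length * Cn ≤ K) (d : Int × Int) :
    pvBall land Cn K c d = true ↔ ReachCell land Cn c d := by
  constructor
  · exact ball_to_reach
  · intro hr
    obtain ⟨j, hj, hlen⟩ := exists_ball_stab land Cn c hg
    have hset : pvBallSet land Cn (j + 1) c = pvBallSet land Cn j c :=
      ((ballSet_sublist land Cn j c).eq_of_length hlen.symm).symm
    have hstab : ∀ e, pvBall land Cn (j + 1) c e = true → pvBall land Cn j c e = true := by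
      intro e he
      have hge : InGrid land.length Cn e := ball_ingrid hg he
      have : e ∈ pvBallSet land Cn (j + 1) c := by
        rw [pvBallSet, List.mem_filter]
        exact ⟨(mem_pvAllCells ..).mpr hge, he⟩
      rw [hset, pvBallSet, List.mem_filter] at this
      exact this.2
    have hclosed : pvBall land Cn j c d = true := by
      induction hr with
      | refl => exact ball_refl land Cn j c
      | tail _ hstep ih => exact hstab _ (ball_step ih hstep)
    exact ball_mono (by omega) hclosed

-- ---- the cell-id function and its injectivity ----
def pvId (Cn : Int) (c : Int × Int) : Int := c.1 * Cn + c.2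

lemma pvId_inj {Rn Cn : Nat} {c d : Int × Int} (hc : InGrid Rn Cn c) (hd : InGrid Rn Cn d)
    (h : pvId (Cn : Int) c = pvId (Cn : Int) d) : c = d := by
  obtain ⟨a, b⟩ := c; obtain ⟨x, y⟩ := d
  obtain ⟨h1, h2, h3, h4⟩ := hc; obtain ⟨h5, h6, h7, h8⟩ := hd
  simp only [pvId] at h
  simp only at h1 h2 h3 h4 h5 h6 h7 h8
  have hax : a = x := by
    rcases lt_trichotomy a x with hlt | heq | hgt
    · exfalso
      have hmul : (a + 1) * (Cn : Int) ≤ x * (Cn : Int) :=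
        mul_le_mul_of_nonneg_right (by omega) (by positivity)
      rw [add_one_mul] at hmul
      linarith
    · exact heq
    · exfalso
      have hmul : (x + 1) * (Cn : Int) ≤ a * (Cn : Int) :=
        mul_le_mul_of_nonneg_right (by omega) (by positivity)
      rw [add_one_mul] at hmul
      linarith
  subst hax
  have : b = y := by linarith
  simp [this]

-- ---- reading the comprehension-built grids ----
lemma shape_mkGrid (Rn Cn : Nat) (f : Int → Int → Int) :
    Shape2 Rn Cn ((PySem.List.pyRange 0 (Rn : Int) 1).map (fun i =>
      (PySem.List.pyRange 0 (Cn : Int) 1).map (fun j => f i j))) := by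
  constructor
  · simp [PySem.List.length_pyRange_one]
  · intro r hr
    obtain ⟨i, _, rfl⟩ := List.mem_map.mp hr
    simp [PySem.List.length_pyRange_one]

lemma pvGet_mkGrid (Rn Cn : Nat) (f : Int → Int → Int) {c : Int × Int}
    (hg : InGrid Rn Cn c) :
    pvGet 0 ((PySem.List.pyRange 0 (Rn : Int) 1).map (fun i =>
      (PySem.List.pyRange 0 (Cn : Int) 1).map (fun j => f i j))) c.1 c.2 = f c.1 c.2 := by
  obtain ⟨a, b⟩ := c
  obtain ⟨h1, h2, h3, h4⟩ := hg
  simp only at h1 h2 h3 h4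
  show pvGet 0 _ a b = f a b
  have ha : a.toNat < ((PySem.List.pyRange 0 (Rn : Int) 1).map (fun i =>
      (PySem.List.pyRange 0 (Cn : Int) 1).map (fun j => f i j))).length := by
    rw [List.length_map, PySem.List.length_pyRange_one]; omega
  rw [pvGet, List.getD_eq_getElem _ _ ha, List.getElem_map]
  rw [PySem.List.getElem_pyRange_one]
  have ea : (0 : Int) + (a.toNat : Int) = a := by omega
  rw [ea]
  rw [← PySem.List.pyGetD_natCast]
  rw [PySem.List.pyGetD_map_pyRange (fun j => f a j) Cn b.toNat 0 (by omega)]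
  have eb : ((b.toNat : Nat) : Int) = b := by omega
  rw [eb]

lemma grid_ext {Rn Cn : Nat} {G H : List (List Int)} (hG : Shape2 Rn Cn G) (hH : Shape2 Rn Cn H)
    (h : ∀ c, InGrid Rn Cn c → pvGet 0 G c.1 c.2 = pvGet 0 H c.1 c.2) : G = H := by
  obtain ⟨hlen1, hrow1⟩ := hG
  obtain ⟨hlen2, hrow2⟩ := hH
  apply List.ext_getElem (by omega)
  intro a ha1 ha2
  apply List.ext_getElem (by rw [hrow1 _ (List.getElem_mem ha1), hrow2 _ (List.getElem_mem ha2)])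
  intro b hb1 hb2
  have hbc1 : b < Cn := by rw [← hrow1 _ (List.getElem_mem ha1)]; exact hb1
  have hg : InGrid Rn Cn ((a : Int), (b : Int)) := by
    refine ⟨by omega, by simp; omega, by omega, by simp; omega⟩
  have hget1 : pvGet 0 G (a : Int) (b : Int) = G[a][b] := by
    rw [pvGet]
    simp only [Int.toNat_natCast]
    rw [List.getD_eq_getElem _ _ ha1, List.getD_eq_getElem _ _ hb1]
  have hget2 : pvGet 0 H (a : Int) (b : Int) = H[a][b] := by
    rw [pvGet]
    simp only [Int.toNat_natCast]
    rw [List.getD_eq_getElem _ _ ha2, List.getD_eq_getElem _ _ hb2]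
  rw [← hget1, ← hget2]
  exact h _ hg

-- ---- the propagation invariant ----
def LabGood (land : List (List Int)) (Cn k : Nat) (L : List (List Int)) : Prop :=
  ∀ c, InGrid land.length Cn c →
    (pvGet 0 land c.1 c.2 = 1 →
      (∃ d, pvBall land Cn k c d = true ∧ pvGet 0 L c.1 c.2 = pvId (Cn : Int) d) ∧
      (∀ d, pvBall land Cn k c d = true → pvGet 0 L c.1 c.2 ≤ pvId (Cn : Int) d)) ∧
    (pvGet 0 land c.1 c.2 ≠ 1 → pvGet 0 L c.1 c.2 = (land.length : Int) * (Cn : Int))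

lemma labGood_lab0 (land : List (List Int)) (Cn : Nat) :
    LabGood land Cn 0 (pvLab0 land (land.length : Int) (Cn : Int)) := by
  intro c hg
  have hget := pvGet_mkGrid land.length Cn
    (fun i j => if pvGet 0 land i j == 1 then i * (Cn : Int) + j else (land.length : Int) * (Cn : Int)) hg
  rw [pvLab0] at *
  constructor
  · intro hl
    rw [hget]
    simp only [hl, beq_self_eq_true, if_true]
    refine ⟨⟨c, ball_refl land Cn 0 c, rfl⟩, ?_⟩
    intro d hd
    rw [ball_zero_iff] at hd
    subst hd
    exact le_refl _
  · intro hl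
    rw [hget]
    simp only [beq_iff_eq, hl, if_false]

lemma labGood_relax {land : List (List Int)} {Cn k : Nat} {L : List (List Int)}
    (h : LabGood land Cn k L) :
    LabGood land Cn (k + 1) (pvRelax land (land.length : Int) (Cn : Int) L) := by
  intro c hg
  have hget := pvGet_mkGrid land.length Cn
    (fun i j => if pvGet 0 land i j == 1 then
        (((pvNbrs i j).filter (fun e => pvInb (land.length : Int) (Cn : Int) e.1 e.2
            && (pvGet 0 land e.1 e.2 == 1))).map
          (fun e => pvGet 0 L e.1 e.2)).foldl min (pvGet 0 L i j)
      else pvGet 0 L i j) hg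
  rw [pvRelax] at *
  constructor
  · intro hl
    have hoc : OkCell land Cn c := ⟨hg, hl⟩
    rw [hget]
    simp only [hl, beq_self_eq_true, if_true]
    set M := (((pvNbrs c.1 c.2).filter (fun e => pvInb (land.length : Int) (Cn : Int) e.1 e.2
        && (pvGet 0 land e.1 e.2 == 1))).map (fun e => pvGet 0 L e.1 e.2)) with hM
    constructor
    · -- attained
      rcases PySem.List.foldl_min_mem M (pvGet 0 L c.1 c.2) with hcase | hcase
      · obtain ⟨d, hbd, hed⟩ := ((h c hg).1 hl).1
        exact ⟨d, ball_mono_succ hbd, by rw [hcase]; exact hed⟩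
      · rw [hM] at hcase
        obtain ⟨n, hnmem, hne⟩ := List.mem_map.mp hcase
        obtain ⟨hnbr, hpred⟩ := List.mem_filter.mp hnmem
        have hon : OkCell land Cn n := (pvOkB_iff land Cn n).mp hpred
        have hstep : StepCell land Cn c n := ⟨hoc, hon, (mem_nbrs_iff c n).mp hnbr⟩
        obtain ⟨d, hbd, hed⟩ := ((h n hon.1).1 hon.2).1
        exact ⟨d, (ball_succ_iff land Cn k c d).mpr (Or.inr ⟨n, hstep, hbd⟩),
          by rw [← hne]; exact hed⟩
    · -- lower bound
      intro d hd
      rcases (ball_succ_iff land Cn k c d).mp hd with hb | ⟨n, hstep, hb⟩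
      · have hle1 := (PySem.List.foldl_min_le M (pvGet 0 L c.1 c.2)).1
        have hle2 := ((h c hg).1 hl).2 d hb
        exact le_trans hle1 hle2
      · have hon : OkCell land Cn n := hstep.2.1
        have hnbr : n ∈ pvNbrs c.1 c.2 := (mem_nbrs_iff c n).mpr hstep.2.2
        have hpred : (pvInb (land.length : Int) (Cn : Int) n.1 n.2
            && (pvGet 0 land n.1 n.2 == 1)) = true := (pvOkB_iff land Cn n).mpr hon
        have hmemM : pvGet 0 L n.1 n.2 ∈ M := by
          rw [hM]
          exact List.mem_map.mpr ⟨n, List.mem_filter.mpr ⟨hnbr, hpred⟩, rfl⟩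
        have hle1 := (PySem.List.foldl_min_le M (pvGet 0 L c.1 c.2)).2 _ hmemM
        have hle2 := ((h n hon.1).1 hon.2).2 d hb
        exact le_trans hle1 hle2
  · intro hl
    rw [hget]
    simp only [beq_iff_eq, hl, if_false]
    exact (h c hg).2 hl

lemma labGood_iterate (land : List (List Int)) (Cn : Nat) :
    ∀ k, LabGood land Cn k
      ((pvRelax land (land.length : Int) (Cn : Int))^[k]
        (pvLab0 land (land.length : Int) (Cn : Int))) := by
  intro k
  induction k with
  | zero => exact labGood_lab0 land Cn
  | succ k ih =>
    rw [Function.iterate_succ_apply']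
    exact labGood_relax ih

lemma shape_iterate (land : List (List Int)) (Cn : Nat) (k : Nat) :
    Shape2 land.length Cn
      ((pvRelax land (land.length : Int) (Cn : Int))^[k]
        (pvLab0 land (land.length : Int) (Cn : Int))) := by
  cases k with
  | zero => exact shape_mkGrid land.length Cn _
  | succ k =>
    rw [Function.iterate_succ_apply']
    exact shape_mkGrid land.length Cn _

-- the stabilized labelling
def pvLabF (land : List (List Int)) (Cn : Nat) : List (List Int) :=
  (pvRelax land (land.length : Int) (Cn : Int))^[land.length * Cn]
    (pvLab0 land (land.length : Int) (Cn : Int))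

lemma labF_spec (land : List (List Int)) (Cn : Nat) (c : Int × Int)
    (hg : InGrid land.length Cn c) :
    (pvGet 0 land c.1 c.2 = 1 →
      (∃ d, ReachCell land Cn c d ∧ pvGet 0 (pvLabF land Cn) c.1 c.2 = pvId (Cn : Int) d) ∧
      (∀ d, ReachCell land Cn c d → pvGet 0 (pvLabF land Cn) c.1 c.2 ≤ pvId (Cn : Int) d)) ∧
    (pvGet 0 land c.1 c.2 ≠ 1 →
      pvGet 0 (pvLabF land Cn) c.1 c.2 = (land.length : Int) * (Cn : Int)) := by
  have h := labGood_iterate land Cn (land.length * Cn) c hg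
  refine ⟨?_, h.2⟩
  intro hl
  obtain ⟨⟨d, hbd, hed⟩, hbound⟩ := h.1 hl
  refine ⟨⟨d, (ball_reach_iff land Cn c hg _ le_rfl d).mp hbd, hed⟩, ?_⟩
  intro d hr
  exact hbound d ((ball_reach_iff land Cn c hg _ le_rfl d).mpr hr)

lemma relax_fix (land : List (List Int)) (Cn : Nat) :
    pvRelax land (land.length : Int) (Cn : Int) (pvLabF land Cn) = pvLabF land Cn := by
  have hdef : pvLabF land Cn
      = (pvRelax land (land.length : Int) (Cn : Int))^[land.length * Cn]
          (pvLab0 land (land.length : Int) (Cn : Int)) := rfl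
  rw [hdef, ← Function.iterate_succ_apply' (pvRelax land (land.length : Int) (Cn : Int))
      (land.length * Cn) (pvLab0 land (land.length : Int) (Cn : Int))]
  refine grid_ext (shape_iterate land Cn _) (shape_iterate land Cn _) ?_
  intro c hg
  have h1 := labGood_iterate land Cn (land.length * Cn + 1) c hg
  have h0 := labGood_iterate land Cn (land.length * Cn) c hg
  by_cases hl : pvGet 0 land c.1 c.2 = 1
  · obtain ⟨⟨d1, hb1, he1⟩, hbd1⟩ := h1.1 hl
    obtain ⟨⟨d0, hb0, he0⟩, hbd0⟩ := h0.1 hl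
    have hr1 : ReachCell land Cn c d1 := ball_to_reach hb1
    have hr0 : ReachCell land Cn c d0 := ball_to_reach hb0
    have hle1 := hbd1 d0 ((ball_reach_iff land Cn c hg _ (by omega) d0).mpr hr0)
    have hle2 := hbd0 d1 ((ball_reach_iff land Cn c hg _ le_rfl d1).mpr hr1)
    rw [← he0] at hle1
    rw [← he1] at hle2
    exact le_antisymm hle1 hle2
  · rw [h1.2 hl, h0.2 hl]

-- the early-exit loop returns the fixpoint once it is within fuel
lemma pvProp_eq (land : List (List Int)) (R C : Int) (Lfix : List (List Int))
    (hfix : pvRelax land R C Lfix = Lfix) :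
    ∀ (fuel : Nat), ∀ (n : Nat) (lab : List (List Int)), n ≤ fuel →
      (pvRelax land R C)^[n] lab = Lfix → pvProp land R C fuel lab = Lfix := by
  intro fuel
  induction fuel with
  | zero =>
    intro n lab hn hiter
    have : n = 0 := by omega
    subst this
    exact hiter
  | succ fuel ih =>
    intro n lab hn hiter
    by_cases heq : pvRelax land R C lab = lab
    · have hfix' : (pvRelax land R C)^[n] lab = lab := Function.iterate_fixed heq n
      rw [hfix'] at hiter
      simp only [pvProp, heq]
      simp [hiter]
    · have hne : (pvRelax land R C lab == lab) = false := by
        simp [heq]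
      simp only [pvProp, hne]
      simp only [Bool.false_eq_true, if_false]
      cases n with
      | zero =>
        exfalso
        simp only [Function.iterate_zero, id_eq] at hiter
        subst hiter
        exact heq hfix
      | succ m =>
        refine ih m (pvRelax land R C lab) (by omega) ?_
        rw [← Function.iterate_succ_apply]
        exact hiter

lemma lab_result (land : List (List Int)) (Cn : Nat) :
    pvProp land (land.length : Int) (Cn : Int) (land.length * Cn + 1)
      (pvLab0 land (land.length : Int) (Cn : Int)) = pvLabF land Cn :=
  pvProp_eq land _ _ (pvLabF land Cn) (relax_fix land Cn)
    (land.length * Cn + 1) (land.length * Cn) _ (by omega) rfl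

-- equal final labels characterize connectivity
lemma labF_eq_iff (land : List (List Int)) (Cn : Nat) {c d : Int × Int}
    (hoc : OkCell land Cn c) (hgd : InGrid land.length Cn d) :
    (pvGet 0 land d.1 d.2 = 1 ∧
      pvGet 0 (pvLabF land Cn) d.1 d.2 = pvGet 0 (pvLabF land Cn) c.1 c.2)
    ↔ ReachCell land Cn c d := by
  constructor
  · rintro ⟨hld, heq⟩
    obtain ⟨⟨mc, hrc, hec⟩, _⟩ := (labF_spec land Cn c hoc.1).1 hoc.2
    obtain ⟨⟨md, hrd, hed⟩, _⟩ := (labF_spec land Cn d hgd).1 hld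
    have hid : pvId (Cn : Int) md = pvId (Cn : Int) mc := by
      rw [← hed, ← hec, heq]
    have hmeq : md = mc :=
      pvId_inj (reach_ingrid hgd hrd) (reach_ingrid hoc.1 hrc) hid
    subst hmeq
    exact hrc.trans (reachCell_symm hrd)
  · intro hr
    have hod : OkCell land Cn d := reach_ok hoc hr
    refine ⟨hod.2, ?_⟩
    obtain ⟨⟨mc, hrc, hec⟩, hbc⟩ := (labF_spec land Cn c hoc.1).1 hoc.2
    obtain ⟨⟨md, hrd, hed⟩, hbd⟩ := (labF_spec land Cn d hgd).1 hod.2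
    have h1 : pvGet 0 (pvLabF land Cn) d.1 d.2 ≤ pvGet 0 (pvLabF land Cn) c.1 c.2 := by
      rw [hec]
      exact hbd mc ((reachCell_congr hr).mpr hrc)
    have h2 : pvGet 0 (pvLabF land Cn) c.1 c.2 ≤ pvGet 0 (pvLabF land Cn) d.1 d.2 := by
      rw [hed]
      exact hbc md ((reachCell_congr hr).mp hrd)
    omega

-- ---- the counting dict ----
lemma cells_flat_eq (Rn Cn : Nat) :
    (PySem.List.pyRange 0 (Rn : Int) 1).flatMap
      (fun i => (PySem.List.pyRange 0 (Cn : Int) 1).map (fun j => ((i, j) : Int × Int)))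
    = pvAllCells Rn Cn := by
  rw [pvAllCells]
  rw [PySem.List.pyRange_one, PySem.List.pyRange_one]
  simp [List.flatMap_map, List.map_map, Function.comp_def]

lemma counts_getD (land lab : List (List Int)) (Cn : Nat) (key : Int) :
    (pvCounts land lab (land.length : Int) (Cn : Int)).getD key 0
      = (((pvAllCells land.length Cn).filter (fun c => pvGet 0 land c.1 c.2 == 1)).countP
          (fun c => pvGet 0 lab c.1 c.2 == key) : Int) := by
  rw [pvCounts]
  rw [← foldl_flatA (PySem.List.pyRange 0 (land.length : Int) 1)
      (PySem.List.pyRange 0 (Cn : Int) 1)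
      (fun (d : PySem.Dict Int Int) i j => if pvGet 0 land i j == 1 then
        d.insert (pvGet 0 lab i j) (d.getD (pvGet 0 lab i j) 0 + 1) else d)]
  rw [cells_flat_eq]
  rw [PySem.List.foldl_if_eq_foldl_filter (fun c : Int × Int => pvGet 0 land c.1 c.2 == 1)
      (fun (d : PySem.Dict Int Int) (c : Int × Int) =>
        d.insert (pvGet 0 lab c.1 c.2) (d.getD (pvGet 0 lab c.1 c.2) 0 + 1))]
  rw [show (fun (d : PySem.Dict Int Int) (c : Int × Int) =>
        d.insert (pvGet 0 lab c.1 c.2) (d.getD (pvGet 0 lab c.1 c.2) 0 + 1))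
      = (fun d c => (fun (d : PySem.Dict Int Int) (x : Int) => d.insert x (d.getD x 0 + 1)) d
          ((fun c : Int × Int => pvGet 0 lab c.1 c.2) c)) from rfl]
  rw [← List.foldl_map (f := fun c : Int × Int => pvGet 0 lab c.1 c.2)
      (g := fun (d : PySem.Dict Int Int) (x : Int) => d.insert x (d.getD x 0 + 1))]
  rw [PySem.Dict.getD_foldl_insert_add_one]
  rw [PySem.Dict.getD_empty]
  rw [List.count_eq_countP, List.countP_map]
  simp [Function.comp_def]

-- ---- B's size grid satisfies the final characterization ----
lemma B_finalChar (land : List (List Int)) (Cn : Nat) :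
    FinalChar land Cn
      ((PySem.List.pyRange 0 (land.length : Int) 1).map (fun i =>
        (PySem.List.pyRange 0 (Cn : Int) 1).map (fun j =>
          if pvGet 0 land i j == 1 then
            (pvCounts land (pvLabF land Cn) (land.length : Int) (Cn : Int)).getD
              (pvGet 0 (pvLabF land Cn) i j) 0
          else 0))) := by
  refine ⟨shape_mkGrid land.length Cn _, ?_⟩
  intro c hg
  have hget := pvGet_mkGrid land.length Cn
    (fun i j => if pvGet 0 land i j == 1 then
        (pvCounts land (pvLabF land Cn) (land.length : Int) (Cn : Int)).getD
          (pvGet 0 (pvLabF land Cn) i j) 0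
      else 0) hg
  constructor
  · intro hl
    have hoc : OkCell land Cn c := ⟨hg, hl⟩
    refine ⟨(pvAllCells land.length Cn).filter
      (fun d => (pvGet 0 (pvLabF land Cn) d.1 d.2 == pvGet 0 (pvLabF land Cn) c.1 c.2) &&
        (pvGet 0 land d.1 d.2 == 1)), ?_, ?_, ?_⟩
    · exact (nodup_pvAllCells ..).filter _
    · intro d
      rw [List.mem_filter, mem_pvAllCells]
      constructor
      · rintro ⟨hgd, hpred⟩
        simp only [Bool.and_eq_true, beq_iff_eq] at hpred
        exact (labF_eq_iff land Cn hoc hgd).mp ⟨hpred.2, hpred.1⟩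
      · intro hr
        have hgd : InGrid land.length Cn d := reach_ingrid hoc.1 hr
        have h2 := (labF_eq_iff land Cn hoc hgd).mpr hr
        refine ⟨hgd, ?_⟩
        simp only [Bool.and_eq_true, beq_iff_eq]
        exact ⟨h2.2, h2.1⟩
    · rw [hget]
      simp only [hl, beq_self_eq_true, if_true]
      rw [counts_getD]
      congr 1
      rw [List.countP_eq_length_filter, List.filter_filter]
  · intro hl
    rw [hget]
    simp only [beq_iff_eq, hl, if_false]

-- ---- phase 2: the column scan ----
lemma int_bne_comm (a b : Int) : (a != b) = (b != a) := by
  simp only [bne]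
  by_cases h : a = b
  · subst h; rfl
  · have h1 : (a == b) = false := by simpa using h
    have h2 : (b == a) = false := by simpa using (Ne.symm h)
    rw [h1, h2]

lemma foldl_if_add_nonneg {α : Type} (p : α → Bool) (f : α → Int) :
    ∀ (l : List α), (∀ x ∈ l, 0 ≤ f x) → ∀ init : Int,
      init ≤ l.foldl (fun s x => if p x then s + f x else s) init := by
  intro l
  induction l with
  | nil => intro _ init; exact le_refl _
  | cons x t ih =>
    intro h init
    rw [List.foldl_cons]
    have h1 : init ≤ if p x then init + f x else init := by
      split
      · have := h x (List.mem_cons_self ..)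
        omega
      · exact le_refl _
    exact le_trans h1 (ih (fun y hy => h y (List.mem_cons_of_mem _ hy)) _)

lemma foldl_max_eq_ite (L : List Int) (h : ∀ x ∈ L, 0 ≤ x) :
    L.foldl max 0 = if L.length = 0 then (0 : Int)
      else (PySem.List.max? L (fun x => x)).getD 0 := by
  cases L with
  | nil => rfl
  | cons x t =>
    simp only [List.length_cons, Nat.succ_ne_zero, if_false]
    rw [PySem.List.max?_id_cons, Option.getD_some, List.foldl_cons]
    have hx : max 0 x = x := max_eq_right (h x (List.mem_cons_self ..))
    rw [hx]

lemma finalChar_nonneg {land : List (List Int)} {Cn : Nat} {M : List (List Int)}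
    (h : FinalChar land Cn M) :
    ∀ c : Int × Int, InGrid land.length Cn c → 0 ≤ pvGet 0 M c.1 c.2 := by
  intro c hg
  by_cases hl : pvGet 0 land c.1 c.2 = 1
  · obtain ⟨l, _, _, hval⟩ := (h.2 c hg).1 hl
    rw [hval]
    positivity
  · rw [(h.2 c hg).2 hl]

lemma phase2_eq (Rn Cn : Nat) (M : List (List Int))
    (hnn : ∀ c : Int × Int, InGrid Rn Cn c → 0 ≤ pvGet 0 M c.1 c.2) :
    (if ((PySem.List.pyRange 0 (Cn : Int) 1).foldl (fun ans i =>
          ans ++ [(PySem.List.pyRange 0 (Rn : Int) 1).foldl (fun s j =>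
            if pvGet 0 M j i != 0 &&
                ((PySem.List.pyGet? M (j - 1)).getD []).getD i.toNat 0 != pvGet 0 M j i then
              s + pvGet 0 M j i else s) (0 : Int)]) ([] : List Int)).length = 0 then (0 : Int)
      else (PySem.List.max? ((PySem.List.pyRange 0 (Cn : Int) 1).foldl (fun ans i =>
          ans ++ [(PySem.List.pyRange 0 (Rn : Int) 1).foldl (fun s j =>
            if pvGet 0 M j i != 0 &&
                ((PySem.List.pyGet? M (j - 1)).getD []).getD i.toNat 0 != pvGet 0 M j i then
              s + pvGet 0 M j i else s) (0 : Int)]) ([] : List Int)) (fun x => x)).getD 0)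
    = (PySem.List.pyRange 0 (Cn : Int) 1).foldl (fun best c =>
        max best ((PySem.List.pyRange 0 (Rn : Int) 1).foldl (fun s i =>
          if pvGet 0 M i c != 0 &&
              pvGet 0 M i c != ((PySem.List.pyGet? M (i - 1)).getD []).getD c.toNat 0 then
            s + pvGet 0 M i c else s) (0 : Int))) 0 := by
  have hcol : ∀ i : Int, 0 ≤ i → i < (Cn : Int) →
      0 ≤ (PySem.List.pyRange 0 (Rn : Int) 1).foldl (fun s j =>
        if pvGet 0 M j i != 0 &&
            ((PySem.List.pyGet? M (j - 1)).getD []).getD i.toNat 0 != pvGet 0 M j i then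
          s + pvGet 0 M j i else s) (0 : Int) := by
    intro i h0 hC
    refine foldl_if_add_nonneg _ (fun j => pvGet 0 M j i) _ ?_ 0
    intro j hj
    rw [PySem.List.mem_pyRange_one] at hj
    exact hnn (j, i) ⟨hj.1, hj.2, h0, hC⟩
  rw [PySem.List.foldl_append_singleton_eq_map, List.nil_append]
  have hnnL : ∀ x ∈ (PySem.List.pyRange 0 (Cn : Int) 1).map (fun i =>
      (PySem.List.pyRange 0 (Rn : Int) 1).foldl (fun s j =>
        if pvGet 0 M j i != 0 &&
            ((PySem.List.pyGet? M (j - 1)).getD []).getD i.toNat 0 != pvGet 0 M j i then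
          s + pvGet 0 M j i else s) (0 : Int)), 0 ≤ x := by
    intro x hx
    obtain ⟨i, hi, rfl⟩ := List.mem_map.mp hx
    rw [PySem.List.mem_pyRange_one] at hi
    exact hcol i hi.1 hi.2
  rw [← foldl_max_eq_ite _ hnnL, List.foldl_map]
  refine PySem.List.foldl_congr_mem _ _ _ _ ?_
  intro acc i _
  congr 1
  refine PySem.List.foldl_congr_mem _ _ _ _ ?_
  intro s j _
  rw [int_bne_comm (((PySem.List.pyGet? M (j - 1)).getD []).getD i.toNat 0) (pvGet 0 M j i)]

-- ===== VERDICT (by name: the statement is the Claim_ definition above) =====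
theorem solution_spec : Claim_equal_solution := by
  unfold Claim_equal_solution
  intro land _ _hpre
  unfold Spec_solution
  show solution land = solution_alt land
  have hB := B_finalChar land (land.headD []).length
  have hMeq := finalChar_unique (outerA_finalChar land (land.headD []).length) hB
  simp only [solution, solution_alt, Int.toNat_natCast]
  rw [lab_result, hMeq]
  exact phase2_eq land.length (land.headD []).length _ (finalChar_nonneg hB)
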